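-- pv_equiv track=rewrite | github.com/nageshwari76/DSA | 3917-count-indices-with-opposite-parity/3917-count-indices-with-opposite-parity.py | countOppositeParity
-- ===== SOURCE A (Python) =====
-- def countOppositeParity(nums: list[int]) -> list[int]:
--     n = len(nums)
--     odd = 0
--     even = 0
--     result = [0] * n
--     for i in range(n - 1, -1, -1):
--         if nums[i] % 2 == 1:
--             result[i] = even
--             odd += 1
--         else:
--             result[i] = odd
--             even += 1
--
--     return result
-- ===== SOURCE B (Python) =====
-- def countOppositeParity(nums: list[int]) -> list[int]:
--     totalOdd = sum(1 for x in nums if x % 2 == 1)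
--     totalEven = len(nums) - totalOdd
--     result = []
--     oddsSoFar = 0
--     evensSoFar = 0
--     for x in nums:
--         if x % 2 == 1:
--             result.append(totalEven - evensSoFar)
--             oddsSoFar += 1
--         else:
--             result.append(totalOdd - oddsSoFar)
--             evensSoFar += 1
--     return result
-- ===== Notes on version B (the rewrite author's own statement) =====
-- stated objective: alternative
-- what changed: Replaces the backward scan with a reverse-incremental suffix accumulator by a two-phase forward algorithm: one pass computes total odd/even counts, a second forward pass emits total-minus-prefix counts.
import Mathlib
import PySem

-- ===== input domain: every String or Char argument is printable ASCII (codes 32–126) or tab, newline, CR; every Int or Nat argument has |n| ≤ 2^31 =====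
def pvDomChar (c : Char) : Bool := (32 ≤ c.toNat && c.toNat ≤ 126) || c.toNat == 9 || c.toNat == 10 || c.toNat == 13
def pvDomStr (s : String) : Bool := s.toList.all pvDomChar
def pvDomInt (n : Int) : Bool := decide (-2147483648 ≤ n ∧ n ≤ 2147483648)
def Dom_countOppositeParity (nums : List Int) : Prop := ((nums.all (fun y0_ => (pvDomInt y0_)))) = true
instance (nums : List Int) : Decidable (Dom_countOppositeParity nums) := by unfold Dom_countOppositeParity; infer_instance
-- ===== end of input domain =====

-- B replaces A's backward suffix-accumulator scan by a two-phase forward algorithm (totals then prefix subtraction); equivalence proved for all inputs.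
-- ===== PORT A =====
-- reverse loop i = n-1 .. 0 ported as structural recursion from the right end of the list,
-- carrying the same (odd, even) state and the result built so far; nums[i] % 2 via PySem.Int.mod.
def pvGoA : List Int → Int × Int × List Int
  | [] => (0, 0, [])
  | x :: xs =>
    if PySem.Int.mod x 2 = 1 then
      ((pvGoA xs).1 + 1, (pvGoA xs).2.1, (pvGoA xs).2.1 :: (pvGoA xs).2.2)
    else
      ((pvGoA xs).1, (pvGoA xs).2.1 + 1, (pvGoA xs).1 :: (pvGoA xs).2.2)

def countOppositeParity (nums : List Int) : List Int := (pvGoA nums).2.2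

-- ===== PORT B =====
-- totalOdd = sum(1 for x in nums if x % 2 == 1)
def pvTotalOdd (nums : List Int) : Int :=
  nums.foldl (fun a x => if PySem.Int.mod x 2 = 1 then a + 1 else a) 0

-- forward loop with result.append, carrying (oddsSoFar, evensSoFar)
def pvGoB (totalOdd totalEven : Int) : Int → Int → List Int → List Int
  | _, _, [] => []
  | oddsSoFar, evensSoFar, x :: xs =>
    if PySem.Int.mod x 2 = 1 then
      (totalEven - evensSoFar) :: pvGoB totalOdd totalEven (oddsSoFar + 1) evensSoFar xs
    else
      (totalOdd - oddsSoFar) :: pvGoB totalOdd totalEven oddsSoFar (evensSoFar + 1) xs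

def countOppositeParity_alt (nums : List Int) : List Int :=
  let totalOdd := pvTotalOdd nums
  let totalEven := (nums.length : Int) - totalOdd
  pvGoB totalOdd totalEven 0 0 nums

-- ===== PRECONDITION & SPEC =====
def Spec_countOppositeParity (nums : List Int) (out : List Int) : Prop := out = countOppositeParity_alt nums
instance (nums : List Int) (out : List Int) : Decidable (Spec_countOppositeParity nums out) := by unfold Spec_countOppositeParity; infer_instance

-- ===== CLAIM (what is proved, stated in full; the proofs are below) =====
def Claim_equal_countOppositeParity : Prop := ∀ (nums : List Int), Dom_countOppositeParity nums → Spec_countOppositeParity nums (countOppositeParity nums)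

-- ===== LEMMAS AND PROOFS =====

theorem pvGoA_fst (xs : List Int) :
    (pvGoA xs).1 = ((xs.filter (fun x => PySem.Int.mod x 2 = 1)).length : Int) := by
  induction xs with
  | nil => rfl
  | cons x xs ih =>
    by_cases h : PySem.Int.mod x 2 = 1
    · rw [pvGoA, if_pos h, List.filter_cons, if_pos (decide_eq_true h), List.length_cons]
      push_cast; omega
    · rw [pvGoA, if_neg h, List.filter_cons, if_neg (by simpa using h)]
      exact ih

theorem pvGoA_snd (xs : List Int) :
    (pvGoA xs).2.1 = ((xs.filter (fun x => ¬ PySem.Int.mod x 2 = 1)).length : Int) := by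
  induction xs with
  | nil => rfl
  | cons x xs ih =>
    by_cases h : PySem.Int.mod x 2 = 1
    · rw [pvGoA, if_pos h, List.filter_cons, if_neg (by simpa using h)]
      exact ih
    · rw [pvGoA, if_neg h, List.filter_cons, if_pos (decide_eq_true h), List.length_cons]
      push_cast; omega

theorem pvTotalOdd_aux (xs : List Int) (a : Int) :
    xs.foldl (fun a x => if PySem.Int.mod x 2 = 1 then a + 1 else a) a
      = a + ((xs.filter (fun x => PySem.Int.mod x 2 = 1)).length : Int) := by
  induction xs generalizing a with
  | nil => simp
  | cons x xs ih =>
    by_cases h : PySem.Int.mod x 2 = 1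
    · rw [List.foldl_cons, if_pos h, ih, List.filter_cons, if_pos (decide_eq_true h),
        List.length_cons]
      push_cast; ring
    · rw [List.foldl_cons, if_neg h, ih, List.filter_cons, if_neg (by simpa using h)]

theorem pvGoB_eq (xs : List Int) (oddF evenF totalOdd totalEven : Int)
    (ho : totalOdd = oddF + ((xs.filter (fun x => PySem.Int.mod x 2 = 1)).length : Int))
    (he : totalEven = evenF + ((xs.filter (fun x => ¬ PySem.Int.mod x 2 = 1)).length : Int)) :
    pvGoB totalOdd totalEven oddF evenF xs = (pvGoA xs).2.2 := by
  induction xs generalizing oddF evenF with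
  | nil => rfl
  | cons x xs ih =>
    by_cases h : PySem.Int.mod x 2 = 1
    · rw [List.filter_cons, if_pos (decide_eq_true h), List.length_cons] at ho
      rw [List.filter_cons, if_neg (by simpa using h)] at he
      push_cast at ho
      have h1 : totalEven - evenF = (pvGoA xs).2.1 := by
        rw [pvGoA_snd]; omega
      rw [pvGoB, if_pos h, pvGoA, if_pos h, h1,
        ih (oddF + 1) evenF (by omega) he]
    · rw [List.filter_cons, if_neg (by simpa using h)] at ho
      rw [List.filter_cons, if_pos (decide_eq_true h), List.length_cons] at he
      push_cast at he
      have h1 : totalOdd - oddF = (pvGoA xs).1 := by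
        rw [pvGoA_fst]; omega
      rw [pvGoB, if_neg h, pvGoA, if_neg h, h1,
        ih oddF (evenF + 1) ho (by omega)]

theorem pvFilter_len_sum (xs : List Int) :
    (xs.filter (fun x => PySem.Int.mod x 2 = 1)).length
      + (xs.filter (fun x => ¬ PySem.Int.mod x 2 = 1)).length = xs.length := by
  induction xs with
  | nil => rfl
  | cons x xs ih =>
    by_cases h : PySem.Int.mod x 2 = 1
    · rw [List.filter_cons, if_pos (decide_eq_true h), List.filter_cons,
        if_neg (by simpa using h), List.length_cons, List.length_cons]
      omega
    · rw [List.filter_cons, if_neg (by simpa using h), List.filter_cons,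
        if_pos (decide_eq_true h), List.length_cons, List.length_cons]
      omega

-- ===== VERDICT (by name: the statement is the Claim_ definition above) =====
theorem countOppositeParity_spec : Claim_equal_countOppositeParity := by
  intro nums _
  unfold Spec_countOppositeParity countOppositeParity countOppositeParity_alt
  rw [pvTotalOdd, pvTotalOdd_aux]
  refine (pvGoB_eq nums 0 0 _ _ (by ring) ?_).symm
  have := pvFilter_len_sum nums
  push_cast
  omega
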